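-- pv_equiv track=rewrite | github.com/HcodingW/some-interesting-small-programs | separateWordFromString.py | nsepa
-- ===== SOURCE A (Python) =====
-- def nsepa(li, splist, k):
--     # find the nearest one from k
--     lip = []
--     for e in splist:
--         if li.find(e, k) != -1:
--             lip.append(li.find(e, k))
--     if lip == []:
--         return -1
--     else:
--         return min(lip)
-- ===== SOURCE B (Python) =====
-- def nsepa(li, splist, k):
--     n = len(li)
--     start = max(0, n + k) if k < 0 else k
--     for i in range(start, n + 1):
--         if any(li.startswith(e, i) for e in splist):
--             return i
--     return -1
-- ===== Notes on version B (the rewrite author's own statement) =====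
-- stated objective: faster
-- what changed: Instead of running li.find(e, k) for every splitter and taking the min of the collected positions, B normalizes the start index once and scans candidate positions i from start to len(li), returning the first i at which some splitter starts (li.startswith(e, i)), so it stops at the nearest match instead of completing a full find per splitter.
import Mathlib
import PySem

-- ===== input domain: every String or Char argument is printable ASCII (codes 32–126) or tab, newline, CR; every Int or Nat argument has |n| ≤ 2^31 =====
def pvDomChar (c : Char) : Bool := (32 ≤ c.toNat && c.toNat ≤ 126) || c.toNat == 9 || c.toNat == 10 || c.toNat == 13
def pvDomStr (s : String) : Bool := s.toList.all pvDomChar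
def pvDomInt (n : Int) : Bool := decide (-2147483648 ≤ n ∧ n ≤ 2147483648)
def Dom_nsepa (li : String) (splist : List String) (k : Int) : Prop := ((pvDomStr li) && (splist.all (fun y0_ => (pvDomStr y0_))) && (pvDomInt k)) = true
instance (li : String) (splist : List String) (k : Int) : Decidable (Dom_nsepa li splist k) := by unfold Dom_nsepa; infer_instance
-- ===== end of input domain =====

-- B scans candidate positions from the normalized start index and returns the first position
-- where some splitter starts, instead of collecting every splitter's find position and taking
-- the minimum; B exits at the nearest match (measured faster in a timing run).

-- ===== PORT A =====
def nsepa (li : String) (splist : List String) (k : Int) : Int :=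
  let lip : List Int := splist.foldl
    (fun acc e =>
      if PySem.Str.findFrom li e k none ≠ -1 then acc ++ [PySem.Str.findFrom li e k none]
      else acc) []
  if lip = [] then -1
  else
    match PySem.List.min? lip (fun x => x) with
    | some m => m
    | none => -1

-- ===== PORT B =====
-- li.startswith(e, i) is ported as a prefix test on li.toList.drop i.toNat:
-- exact for 0 ≤ i ≤ len(li), which holds for every i the range produces.
def nsepa_alt (li : String) (splist : List String) (k : Int) : Int :=
  let n : Int := PySem.Str.len li
  let start : Int := if k < 0 then max 0 (n + k) else k
  match (PySem.List.pyRange start (n + 1) 1).find?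
      (fun i => splist.any (fun e => PySem.Chars.startswith (li.toList.drop i.toNat) e.toList)) with
  | some i => i
  | none => -1

-- ===== PRECONDITION & SPEC =====
def Spec_nsepa (li : String) (splist : List String) (k : Int) (out : Int) : Prop := out = nsepa_alt li splist k
instance (li : String) (splist : List String) (k : Int) (out : Int) : Decidable (Spec_nsepa li splist k out) := by unfold Spec_nsepa; infer_instance

-- ===== CLAIM (what is proved, stated in full; the proofs are below) =====
def Claim_equal_nsepa : Prop := ∀ (li : String) (splist : List String) (k : Int), Dom_nsepa li splist k → Spec_nsepa li splist k (nsepa li splist k)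

-- ===== LEMMAS AND PROOFS =====

theorem findFrom_norm (s sub : List Char) (k : Int) :
    PySem.Chars.findFrom s sub k none =
      (if k < 0 then PySem.Chars.findFrom s sub (max 0 ((s.length : Int) + k)) none
       else if (s.length : Int) < k then -1 else PySem.Chars.findFrom s sub k none) := by
  rcases lt_or_ge k 0 with hk | hk
  · simp only [PySem.Chars.findFrom, if_pos hk]
    have hm : ¬ (max 0 ((s.length : Int) + k) < 0) := by omega
    have hst : (if k + (s.length:Int) < 0 then (0:Int) else k + s.length) = max 0 ((s.length:Int) + k) := by
      split_ifs <;> omega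
    simp only [if_neg hm, hst]
  · have hk' : ¬ k < 0 := by omega
    simp only [PySem.Chars.findFrom, if_neg hk']
    split_ifs <;> rfl

theorem findFrom_le_length (s sub : List Char) (st : Nat) (hst : st ≤ s.length) :
    PySem.Chars.findFrom s sub (st : Int) none ≤ (s.length : Int) := by
  rw [PySem.Chars.findFrom_natCast s sub st hst]
  split_ifs with h
  · omega
  · have := PySem.Chars.find_le_length (List.drop st s) sub
    simp at this
    omega

theorem lip_foldl_eq (f : String → Int) (l : List String) (acc : List Int) :
    l.foldl (fun acc e => if f e ≠ -1 then acc ++ [f e] else acc) acc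
    = acc ++ (l.filter (fun e => f e ≠ -1)).map f := by
  induction l generalizing acc with
  | nil => simp
  | cons e t ih =>
    rw [List.foldl_cons, ih]
    by_cases h : f e = -1 <;> simp [List.filter_cons, h]

theorem find?_pyRange_some (p : Int → Bool) (a b i : Int)
    (h : (PySem.List.pyRange a b 1).find? p = some i) :
    a ≤ i ∧ i < b ∧ p i = true ∧ ∀ j, a ≤ j → j < i → p j = false := by
  by_cases hab : b ≤ a
  · rw [PySem.List.pyRange_one_eq_nil hab] at h; simp at h
  · push_neg at hab
    rw [PySem.List.pyRange_one_cons hab] at h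
    rw [List.find?_cons] at h
    by_cases hpa : p a
    · simp [hpa] at h
      subst h
      exact ⟨le_refl _, hab, hpa, fun j h1 h2 => by omega⟩
    · simp [hpa] at h
      have ih := find?_pyRange_some p (a+1) b i h
      refine ⟨by omega, ih.2.1, ih.2.2.1, fun j h1 h2 => ?_⟩
      rcases eq_or_lt_of_le h1 with rfl | hlt
      · simpa using hpa
      · exact ih.2.2.2 j (by omega) h2
termination_by (b - a).toNat
decreasing_by omega

theorem prefix_drop_infix_drop (s e : List Char) (st j : Nat) (hst : st ≤ j)
    (h : e <+: s.drop j) : e <:+: s.drop st := by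
  have hd : s.drop j = (s.drop st).drop (j - st) := by
    rw [List.drop_drop]; congr 1; omega
  rw [hd] at h
  exact h.isInfix.trans (List.drop_suffix _ _).isInfix

theorem nsepa_eq (li : String) (splist : List String) (k : Int) :
    nsepa li splist k = nsepa_alt li splist k := by
  simp only [nsepa, nsepa_alt, PySem.Str.len_eq]
  rw [lip_foldl_eq (fun e => PySem.Str.findFrom li e k none) splist []]
  simp only [PySem.Str.findFrom_eq, List.nil_append]
  rcases lt_or_ge (li.toList.length : Int)
      (if k < 0 then max 0 ((li.toList.length : Int) + k) else k) with hbig | hle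
  case inl =>
    -- start past the end: every find is -1 and the range is empty
    have hk0 : ¬ k < 0 := by by_contra h; simp [if_pos h] at hbig; omega
    rw [if_neg hk0] at hbig
    have hall : ∀ e : String, PySem.Chars.findFrom li.toList e.toList k none = -1 := by
      intro e
      rw [findFrom_norm li.toList e.toList k, if_neg hk0, if_pos hbig]
    rw [PySem.List.pyRange_one_eq_nil (by rw [if_neg hk0]; omega)]
    simp only [hall]
    simp
  case inr =>
    have h0 : 0 ≤ (if k < 0 then max 0 ((li.toList.length : Int) + k) else k) := by
      split_ifs <;> omega
    obtain ⟨st, hcast⟩ : ∃ st : Nat,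
        (st : Int) = (if k < 0 then max 0 ((li.toList.length : Int) + k) else k) :=
      ⟨(if k < 0 then max 0 ((li.toList.length : Int) + k) else k).toNat, by omega⟩
    have hstn : st ≤ li.toList.length := by omega
    have hFk : ∀ e : List Char, PySem.Chars.findFrom li.toList e k none
        = PySem.Chars.findFrom li.toList e (st : Int) none := by
      intro e
      rw [findFrom_norm li.toList e k]
      by_cases hk : k < 0
      · rw [if_pos hk] at hcast ⊢
        rw [hcast]
      · rw [if_neg hk] at hcast ⊢
        rw [if_neg (by omega : ¬ ((li.toList.length : Int) < k)), hcast]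
    simp only [hFk]
    rw [← hcast]
    cases hf : (PySem.List.pyRange (st : Int) ((li.toList.length : Int) + 1) 1).find?
        (fun i => splist.any (fun e => PySem.Chars.startswith (li.toList.drop i.toNat) e.toList)) with
    | none =>
      have hall := List.find?_eq_none.mp hf
      have hfil : ∀ e ∈ splist, PySem.Chars.findFrom li.toList e.toList (st:Int) none = -1 := by
        intro e he
        by_contra hne
        obtain ⟨hge, hpre, -⟩ := PySem.Chars.findFrom_natCast_spec li.toList e.toList st hstn hne
        have hlen := findFrom_le_length li.toList e.toList st hstn
        have hmem : PySem.Chars.findFrom li.toList e.toList (st:Int) none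
            ∈ PySem.List.pyRange (st : Int) ((li.toList.length : Int) + 1) 1 :=
          PySem.List.mem_pyRange_one.mpr ⟨by omega, by omega⟩
        have hfalse := hall _ hmem
        simp only [Bool.not_eq_true, List.any_eq_false] at hfalse
        have := hfalse e he
        rw [(PySem.Chars.startswith_iff _ _).mpr hpre] at this
        exact absurd this (by simp)
      have hnil : List.filter (fun e => decide (PySem.Chars.findFrom li.toList e.toList (st:Int) none ≠ -1)) splist = [] := by
        rw [List.filter_eq_nil_iff]; intro e he; simp [hfil e he]
      have hmap : List.map (fun e => PySem.Chars.findFrom li.toList e.toList (st:Int) none)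
          (List.filter (fun e => decide (PySem.Chars.findFrom li.toList e.toList (st:Int) none ≠ -1)) splist) = [] := by
        rw [hnil]; rfl
      rw [if_pos hmap]
    | some i =>
      obtain ⟨h1, h2, h3, h4⟩ := find?_pyRange_some _ _ _ _ hf
      obtain ⟨e, he, hsw⟩ := List.any_eq_true.mp h3
      have hpre : e.toList <+: li.toList.drop i.toNat := (PySem.Chars.startswith_iff _ _).mp hsw
      have hi0 : 0 ≤ i := by omega
      have hlow : ∀ e' ∈ splist, PySem.Chars.findFrom li.toList e'.toList (st:Int) none ≠ -1 →
          i ≤ PySem.Chars.findFrom li.toList e'.toList (st:Int) none := by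
        intro e' he' hne
        obtain ⟨hge, hpre', -⟩ := PySem.Chars.findFrom_natCast_spec li.toList e'.toList st hstn hne
        by_contra hlt
        push_neg at hlt
        have hfalse := h4 _ hge hlt
        rw [List.any_eq_false] at hfalse
        have := hfalse e' he'
        rw [(PySem.Chars.startswith_iff _ _).mpr hpre'] at this
        exact absurd this (by simp)
      have hne : PySem.Chars.findFrom li.toList e.toList (st:Int) none ≠ -1 := by
        rw [Ne, PySem.Chars.findFrom_natCast_eq_neg_one_iff li.toList e.toList st hstn, not_not]
        exact prefix_drop_infix_drop li.toList e.toList st i.toNat (by omega) hpre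
      have hFe : PySem.Chars.findFrom li.toList e.toList (st:Int) none = i := by
        obtain ⟨hge, -, hmin⟩ := PySem.Chars.findFrom_natCast_spec li.toList e.toList st hstn hne
        have hle' : PySem.Chars.findFrom li.toList e.toList (st:Int) none ≤ i := by
          by_contra hlt
          push_neg at hlt
          exact hmin i.toNat (by omega) (by omega) hpre
        have := hlow e he hne
        omega
      have himem : i ∈ (splist.filter (fun e' => PySem.Chars.findFrom li.toList e'.toList (st:Int) none ≠ -1)).map
          (fun e' => PySem.Chars.findFrom li.toList e'.toList (st:Int) none) :=
        List.mem_map.mpr ⟨e, List.mem_filter.mpr ⟨he, by simp [hne]⟩, hFe⟩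
      have hnil : (splist.filter (fun e' => PySem.Chars.findFrom li.toList e'.toList (st:Int) none ≠ -1)).map
          (fun e' => PySem.Chars.findFrom li.toList e'.toList (st:Int) none) ≠ [] := by
        intro h; rw [h] at himem; simp at himem
      rw [if_neg hnil]
      cases hm : PySem.List.min? ((splist.filter (fun e' => PySem.Chars.findFrom li.toList e'.toList (st:Int) none ≠ -1)).map
          (fun e' => PySem.Chars.findFrom li.toList e'.toList (st:Int) none)) (fun x => x) with
      | none => exact absurd ((PySem.List.min?_eq_none_iff _ _).mp hm) hnil
      | some m =>
        have hmmem := PySem.List.min?_mem hm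
        obtain ⟨e', hef, hFm⟩ := List.mem_map.mp hmmem
        obtain ⟨he', hne'⟩ := List.mem_filter.mp hef
        have hne'' : PySem.Chars.findFrom li.toList e'.toList (st:Int) none ≠ -1 := by simpa using hne'
        have h5 : i ≤ m := hFm ▸ hlow e' he' hne''
        have h6 : m ≤ i := PySem.List.min?_isMin hm i himem
        have h7 : m = i := by omega
        simp [h7]

-- ===== VERDICT (by name: the statement is the Claim_ definition above) =====
theorem nsepa_spec : Claim_equal_nsepa := by
  intro li splist k _
  unfold Spec_nsepa
  exact nsepa_eq li splist k
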